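-- pv_equiv track=rewrite | github.com/tyler-hayes/Embedded-CL | openloris/OpenLorisDataset.py | make_class_labels
-- ===== SOURCE A (Python) =====
-- def make_class_labels(object_list):
--     d = {}
--     count = 0
--     for obj in object_list:
--         id = '_'.join(obj.split('_')[:-1])
--         if id not in d:
--             d[id] = count
--             count += 1
--     return d
-- ===== SOURCE B (Python) =====
-- def make_class_labels(object_list):
--     prefixes = ['_'.join(obj.split('_')[:-1]) for obj in object_list]
--     # overwrite while scanning backwards: each prefix ends mapped to its FIRST index
--     first = {p: i for i, p in reversed(list(enumerate(prefixes)))}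
--     # rank the unique prefixes by their first-occurrence position
--     return {p: rank for rank, (p, _) in enumerate(sorted(first.items(), key=lambda kv: kv[1]))}
-- ===== Notes on version B (the rewrite author's own statement) =====
-- stated objective: alternative
-- what changed: B computes each prefix's first-occurrence index with a single reversed-overwrite dict comprehension and then ranks the unique prefixes by sorting these indices, instead of A's single forward pass that conditionally inserts with a running counter.
import Mathlib
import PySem

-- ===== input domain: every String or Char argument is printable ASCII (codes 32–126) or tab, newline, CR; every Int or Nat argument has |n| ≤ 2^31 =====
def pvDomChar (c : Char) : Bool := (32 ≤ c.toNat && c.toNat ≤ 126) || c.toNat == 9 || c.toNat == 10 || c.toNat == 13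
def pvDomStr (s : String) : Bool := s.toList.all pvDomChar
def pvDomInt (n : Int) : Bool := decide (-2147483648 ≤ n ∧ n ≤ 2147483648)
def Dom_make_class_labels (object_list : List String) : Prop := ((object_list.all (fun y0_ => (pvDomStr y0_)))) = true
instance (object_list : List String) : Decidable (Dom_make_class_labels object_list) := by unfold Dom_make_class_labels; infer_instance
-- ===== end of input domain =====

-- B replaces A's conditional-insert-with-counter pass by a different algorithm: a reversed
-- overwrite pass that maps each prefix to its first-occurrence index, then a sort of the unique
-- prefixes by that index to assign ranks; same result, different mechanism (alternative).

-- ===== PORT A =====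
-- id = '_'.join(obj.split('_')[:-1])   (shared by both Pythons, kept as a helper in each)
-- obj.split('_') with the nonempty literal separator "_": exact via PySem.Chars.splitOn
def pvPrefix (obj : String) : String :=
  PySem.Str.join "_"
    (PySem.List.slice ((PySem.Chars.splitOn obj.toList ['_']).map String.ofList) none (some (-1)))

def make_class_labels (object_list : List String) : List (String × Int) :=
  (object_list.foldl
    (fun (st : PySem.Dict String Int × Int) obj =>
      let id := pvPrefix obj
      if st.1.contains id then st else (st.1.insert id st.2, st.2 + 1))
    ((PySem.Dict.empty : PySem.Dict String Int), (0 : Int))).1.items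

-- ===== PORT B =====
def make_class_labels_alt (object_list : List String) : List (String × Int) :=
  let prefixes := object_list.map pvPrefix
  let first := (PySem.List.enumerate prefixes 0).reverse.foldl
      (fun (d : PySem.Dict String Int) ip => d.insert ip.2 ip.1) PySem.Dict.empty
  ((PySem.List.enumerate (PySem.List.sorted first.items (fun kv => kv.2) false) 0).foldl
      (fun (d : PySem.Dict String Int) rp => d.insert rp.2.1 rp.1) PySem.Dict.empty).items

-- ===== PRECONDITION & SPEC =====
def Spec_make_class_labels (object_list : List String) (out : List (String × Int)) : Prop := out = make_class_labels_alt object_list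
instance (object_list : List String) (out : List (String × Int)) : Decidable (Spec_make_class_labels object_list out) := by unfold Spec_make_class_labels; infer_instance

-- ===== CLAIM (what is proved, stated in full; the proofs are below) =====
def Claim_equal_make_class_labels : Prop := ∀ (object_list : List String), Dom_make_class_labels object_list → Spec_make_class_labels object_list (make_class_labels object_list)

-- ===== LEMMAS AND PROOFS =====

-- ---- A side: the dict valued (p ↦ its position) over the ordered unique prefix list u ----
def pvMkD (u : List String) : PySem.Dict String Int :=
  PySem.Dict.mk ((PySem.List.enumerate u 0).map (fun a => (a.2, a.1)))

theorem pvMkD_keys (u : List String) : (pvMkD u).keys = u := by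
  simp only [pvMkD, PySem.Dict.keys, List.map_map]
  exact PySem.List.map_snd_enumerate u 0

theorem pvMkD_contains (u : List String) (p : String) :
    (pvMkD u).contains p = decide (p ∈ u) := by
  rw [PySem.Dict.contains_eq_decide_mem_keys, pvMkD_keys]

theorem pvMkD_append (u : List String) (p : String) (hp : p ∉ u) :
    (pvMkD u).insert p (u.length : Int) = pvMkD (u ++ [p]) := by
  apply PySem.Dict.ext
  rw [PySem.Dict.items_insert_of_not_contains]
  · simp [pvMkD, PySem.List.enumerate_append, PySem.List.enumerate_cons]
  · rw [pvMkD_contains]; simpa using hp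

theorem pvLoopA (ps : List String) (u : List String) (hu : u.Nodup) :
    ps.foldl
      (fun (st : PySem.Dict String Int × Int) p =>
        if st.1.contains p then st else (st.1.insert p st.2, st.2 + 1))
      (pvMkD u, (u.length : Int))
    = (pvMkD (PySem.Set.update u ps), ((PySem.Set.update u ps).length : Int)) := by
  induction ps generalizing u with
  | nil => simp [PySem.Set.update]
  | cons p ps ih =>
    have hstep : PySem.Set.update u (p :: ps) = PySem.Set.update (PySem.Set.add u p) ps := rfl
    by_cases hmem : p ∈ u
    · have hadd : PySem.Set.add u p = u := by
        simp [PySem.Set.add, PySem.Set.contains, hmem]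
      have hc : (pvMkD u).contains p = true := by
        rw [pvMkD_contains]; simpa using hmem
      rw [hstep, hadd]
      simp only [List.foldl_cons, hc, if_true]
      exact ih u hu
    · have hadd : PySem.Set.add u p = u ++ [p] := by
        simp [PySem.Set.add, PySem.Set.contains, hmem]
      have hnd : (u ++ [p]).Nodup := by
        rw [List.nodup_append]
        refine ⟨hu, List.nodup_singleton p, ?_⟩
        intro a ha b hb
        have hbp : b = p := by simpa using hb
        subst hbp
        intro h
        exact hmem (h ▸ ha)
      have hc : (pvMkD u).contains p = false := by
        rw [pvMkD_contains]; simpa using hmem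
      rw [hstep, hadd]
      simp only [List.foldl_cons, hc, Bool.false_eq_true, if_false]
      have hlen : ((u.length : Int) + 1) = (((u ++ [p]).length : Int)) := by simp
      rw [pvMkD_append u p hmem, hlen]
      exact ih (u ++ [p]) hnd

theorem pvFold_map (xs : List String) (init : PySem.Dict String Int × Int) :
    xs.foldl
      (fun (st : PySem.Dict String Int × Int) obj =>
        let id := pvPrefix obj
        if st.1.contains id then st else (st.1.insert id st.2, st.2 + 1)) init
    = (xs.map pvPrefix).foldl
      (fun st p => if st.1.contains p then st else (st.1.insert p st.2, st.2 + 1)) init := by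
  rw [List.foldl_map]

-- ---- B side ----
def pvFirst? : List (Int × String) → String → Option Int
  | [], _ => none
  | ip :: L, k => if ip.2 = k then some ip.1 else pvFirst? L k

def pvT : List (Int × String) → List (String × Int)
  | [] => []
  | ip :: L => (ip.2, ip.1) :: pvT (L.filter (fun q => q.2 ≠ ip.2))
termination_by L => L.length
decreasing_by
  simp only [List.length_unattach]
  exact Nat.lt_succ_of_le ((List.length_filter_le _ _).trans (le_of_eq (List.length_attach)))

theorem pvSet_update_filter (xs : List String) (acc : List String) (x : String)
    (hx : x ∈ acc) :
    PySem.Set.update acc (xs.filter (fun y => y ≠ x)) = PySem.Set.update acc xs := by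
  induction xs generalizing acc with
  | nil => rfl
  | cons y ys ih =>
    rw [List.filter_cons]
    by_cases hyx : y = x
    · have hd : (decide (y ≠ x)) = false := by simp [hyx]
      rw [hd]
      simp only [if_false, Bool.false_eq_true]
      have hadd : PySem.Set.add acc y = acc := by
        simp [PySem.Set.add, PySem.Set.contains, hyx ▸ hx]
      calc PySem.Set.update acc (ys.filter (fun y => y ≠ x))
          = PySem.Set.update acc ys := ih acc hx
        _ = PySem.Set.update (PySem.Set.add acc y) ys := by rw [hadd]
        _ = PySem.Set.update acc (y :: ys) := rfl
    · have hd : (decide (y ≠ x)) = true := by simp [hyx]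
      rw [hd]
      simp only [if_true]
      have hx' : x ∈ PySem.Set.add acc y := by
        simp only [PySem.Set.add]
        split <;> simp [hx]
      calc PySem.Set.update acc (y :: ys.filter (fun y => y ≠ x))
          = PySem.Set.update (PySem.Set.add acc y) (ys.filter (fun y => y ≠ x)) := rfl
        _ = PySem.Set.update (PySem.Set.add acc y) ys := ih _ hx'
        _ = PySem.Set.update acc (y :: ys) := rfl

theorem pvSet_update_cons_notmem (ys : List String) (acc : List String) (a : String)
    (ha : a ∉ ys) :
    PySem.Set.update (a :: acc) ys = a :: PySem.Set.update acc ys := by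
  induction ys generalizing acc with
  | nil => rfl
  | cons y ys ih =>
    have hya : y ≠ a := fun h => ha (h ▸ List.mem_cons_self ..)
    have ha' : a ∉ ys := fun h => ha (List.mem_cons_of_mem _ h)
    have hadd : PySem.Set.add (a :: acc) y = a :: PySem.Set.add acc y := by
      by_cases hc : y ∈ acc
      · simp [PySem.Set.add, PySem.Set.contains, hc, hya]
      · simp [PySem.Set.add, PySem.Set.contains, hc, hya]
    calc PySem.Set.update (a :: acc) (y :: ys)
        = PySem.Set.update (PySem.Set.add (a :: acc) y) ys := rfl
      _ = PySem.Set.update (a :: PySem.Set.add acc y) ys := by rw [hadd]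
      _ = a :: PySem.Set.update (PySem.Set.add acc y) ys := ih _ ha'
      _ = a :: PySem.Set.update acc (y :: ys) := rfl

theorem pvDedup_cons_filter (x : String) (xs : List String) :
    PySem.List.dedup (x :: xs) = x :: PySem.List.dedup (xs.filter (fun y => y ≠ x)) := by
  have h1 : PySem.List.dedup (x :: xs) = PySem.Set.update [] (x :: xs) := by
    rw [PySem.List.dedup_eq_ofList]; rfl
  have h2 : PySem.List.dedup (xs.filter (fun y => y ≠ x))
      = PySem.Set.update [] (xs.filter (fun y => y ≠ x)) := by
    rw [PySem.List.dedup_eq_ofList]; rfl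
  rw [h1, h2]
  have hadd : PySem.Set.update [] (x :: xs) = PySem.Set.update [x] xs := by
    simp [PySem.Set.update, PySem.Set.add, PySem.Set.contains]
  rw [hadd, ← pvSet_update_filter xs [x] x (List.mem_singleton.mpr rfl)]
  exact pvSet_update_cons_notmem _ [] x (by simp)

theorem pvT_map_fst (L : List (Int × String)) :
    (pvT L).map Prod.fst = PySem.List.dedup (L.map Prod.snd) := by
  induction L using pvT.induct with
  | case1 => simp [pvT, PySem.List.dedup_eq_ofList, PySem.Set.ofList]
  | case2 ip L ih =>
    have hun : (List.filter (fun x : {x // x ∈ L} => decide (x.val.2 ≠ ip.2)) L.attach).unattach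
        = L.filter (fun q => q.2 ≠ ip.2) := by
      rw [List.unattach_filter (g := fun q => decide (q.2 ≠ ip.2)) (hf := fun x h => rfl),
          List.unattach_attach]
    rw [hun] at ih
    rw [pvT]
    simp only [List.map_cons, ih]
    rw [pvDedup_cons_filter, List.filter_map]
    rfl

theorem pvT_mem_swap (L : List (Int × String)) (p : String × Int) (hp : p ∈ pvT L) :
    (p.2, p.1) ∈ L := by
  induction L using pvT.induct with
  | case1 => simp [pvT] at hp
  | case2 ip L ih =>
    have hun : (List.filter (fun x : {x // x ∈ L} => decide (x.val.2 ≠ ip.2)) L.attach).unattach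
        = L.filter (fun q => q.2 ≠ ip.2) := by
      rw [List.unattach_filter (g := fun q => decide (q.2 ≠ ip.2)) (hf := fun x h => rfl),
          List.unattach_attach]
    rw [hun] at ih
    rw [pvT] at hp
    rcases List.mem_cons.mp hp with h | h
    · subst h; exact List.mem_cons_self ..
    · exact List.mem_cons_of_mem _ (List.mem_of_mem_filter (ih h))

theorem pvT_pairwise (L : List (Int × String))
    (hL : L.Pairwise (fun a b => a.1 < b.1)) :
    (pvT L).Pairwise (fun a b => a.2 < b.2) := by
  induction L using pvT.induct with
  | case1 => simp [pvT]
  | case2 ip L ih =>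
    have hun : (List.filter (fun x : {x // x ∈ L} => decide (x.val.2 ≠ ip.2)) L.attach).unattach
        = L.filter (fun q => q.2 ≠ ip.2) := by
      rw [List.unattach_filter (g := fun q => decide (q.2 ≠ ip.2)) (hf := fun x h => rfl),
          List.unattach_attach]
    rw [hun] at ih
    rw [pvT]
    rcases List.pairwise_cons.mp hL with ⟨hhead, htail⟩
    refine List.pairwise_cons.mpr ⟨?_, ih (htail.filter _)⟩
    intro q hq
    exact hhead _ (List.mem_of_mem_filter (pvT_mem_swap _ q hq))

theorem pvFirst?_filter (L : List (Int × String)) (p k : String) (hk : k ≠ p) :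
    pvFirst? (L.filter (fun q => q.2 ≠ p)) k = pvFirst? L k := by
  induction L with
  | nil => rfl
  | cons ip L ih =>
    rw [List.filter_cons]
    by_cases hip : ip.2 = p
    · have hd : (decide (ip.2 ≠ p)) = false := by simp [hip]
      rw [hd]
      simp only [if_false, Bool.false_eq_true]
      rw [ih, pvFirst?]
      have hne : ¬ ip.2 = k := fun h => hk (h ▸ hip)
      simp [hne]
    · have hd : (decide (ip.2 ≠ p)) = true := by simp [hip]
      rw [hd]
      simp only [if_true]
      rw [pvFirst?, pvFirst?, ih]

theorem pvT_mem_iff (L : List (Int × String)) (p : String × Int) :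
    p ∈ pvT L ↔ pvFirst? L p.1 = some p.2 := by
  induction L using pvT.induct with
  | case1 => simp [pvT, pvFirst?]
  | case2 ip L ih =>
    have hun : (List.filter (fun x : {x // x ∈ L} => decide (x.val.2 ≠ ip.2)) L.attach).unattach
        = L.filter (fun q => q.2 ≠ ip.2) := by
      rw [List.unattach_filter (g := fun q => decide (q.2 ≠ ip.2)) (hf := fun x h => rfl),
          List.unattach_attach]
    rw [hun] at ih
    rw [pvT, pvFirst?]
    by_cases hk : ip.2 = p.1
    · have hnot : p ∉ pvT (L.filter (fun q => q.2 ≠ ip.2)) := by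
        intro hmem
        have h1 : p.1 ∈ (pvT (L.filter (fun q => q.2 ≠ ip.2))).map Prod.fst :=
          List.mem_map_of_mem hmem
        rw [pvT_map_fst, PySem.List.mem_dedup] at h1
        rcases List.mem_map.mp h1 with ⟨q, hq, hq2⟩
        have h3 := List.of_mem_filter hq
        simp only [decide_eq_true_eq] at h3
        exact h3 (hq2.trans hk.symm)
      rw [if_pos hk]
      constructor
      · intro h
        rcases List.mem_cons.mp h with h | h
        · rw [h]
        · exact absurd h hnot
      · intro h
        have h2 : ip.1 = p.2 := Option.some_injective _ h
        exact List.mem_cons.mpr (Or.inl (Prod.ext_iff.mpr ⟨hk.symm, h2.symm⟩))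
    · have hne : p ≠ (ip.2, ip.1) := by
        intro h; exact hk (by rw [h])
      rw [if_neg hk, List.mem_cons, ih, pvFirst?_filter L ip.2 p.1 (fun h => hk h.symm)]
      constructor
      · intro h
        rcases h with h | h
        · exact absurd h hne
        · exact h
      · intro h; right; exact h

def pvD (L : List (Int × String)) : PySem.Dict String Int :=
  L.reverse.foldl (fun (d : PySem.Dict String Int) ip => d.insert ip.2 ip.1) PySem.Dict.empty

theorem pvD_get? (L : List (Int × String)) (k : String) :
    (pvD L).get? k = pvFirst? L k := by
  induction L with
  | nil => simp [pvD, pvFirst?, PySem.Dict.get?_empty]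
  | cons ip L ih =>
    have hsplit : pvD (ip :: L) = (pvD L).insert ip.2 ip.1 := by
      simp [pvD, List.reverse_cons, List.foldl_append]
    rw [hsplit, pvFirst?, PySem.Dict.get?_insert]
    by_cases h : k = ip.2
    · simp [h]
    · have h' : ¬ ip.2 = k := fun hh => h hh.symm
      simp [h, h', ih]

theorem pvD_nodup_keys (L : List (Int × String)) : (pvD L).keys.Nodup := by
  exact PySem.Dict.nodup_keys_foldl_insert_key L.reverse (fun ip => ip.2)
    (fun _ ip => ip.1) PySem.Dict.empty (by simp)

theorem pvD_items_perm (L : List (Int × String)) :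
    (pvT L).Perm (pvD L).items := by
  have hnd1 : (pvT L).Nodup := by
    have h := pvT_map_fst L
    have h2 : ((pvT L).map Prod.fst).Nodup := by
      rw [h]; exact PySem.List.nodup_dedup _
    exact h2.of_map
  have hnd2 : (pvD L).items.Nodup := by
    have h2 : ((pvD L).items.map Prod.fst).Nodup := pvD_nodup_keys L
    exact h2.of_map
  rw [List.perm_ext_iff_of_nodup hnd1 hnd2]
  intro p
  rw [pvT_mem_iff, ← pvD_get? L p.1]
  exact PySem.Dict.get?_eq_some_iff_mem_items (pvD L) p.1 p.2 (pvD_nodup_keys L)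

theorem pvSorted_eq (L : List (Int × String)) (hL : L.Pairwise (fun a b => a.1 < b.1)) :
    PySem.List.sorted (pvD L).items (fun kv => kv.2) false = pvT L :=
  PySem.List.sorted_eq_of_perm_of_pairwise_lt _ _ _ (pvD_items_perm L) (pvT_pairwise L hL)

theorem pvEnum_map (xs : List (String × Int)) (s : Int) :
    (PySem.List.enumerate xs s).map (fun a => (a.2.1, a.1))
      = (PySem.List.enumerate (xs.map Prod.fst) s).map (fun a => (a.2, a.1)) := by
  induction xs generalizing s with
  | nil => rfl
  | cons x xs ih => simp [PySem.List.enumerate_cons, ih]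

theorem pvAltItems (T : List (String × Int)) (hnd : (T.map Prod.fst).Nodup) :
    ((PySem.List.enumerate T 0).foldl
        (fun (d : PySem.Dict String Int) rp => d.insert rp.2.1 rp.1) PySem.Dict.empty).items
      = (PySem.List.enumerate T 0).map (fun a => (a.2.1, a.1)) := by
  rw [PySem.Dict.items_foldl_insert_fresh]
  · rfl
  · intro a _; exact PySem.Dict.contains_empty _
  · have h : (PySem.List.enumerate T 0).map (fun rp => rp.2.1)
        = T.map Prod.fst := by
      have h0 := PySem.List.map_snd_enumerate T 0
      calc (PySem.List.enumerate T 0).map (fun rp => rp.2.1)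
          = ((PySem.List.enumerate T 0).map (·.2)).map Prod.fst := by
            rw [List.map_map]; rfl
        _ = T.map Prod.fst := by rw [h0]
    rw [h]; exact hnd

-- ===== VERDICT (by name: the statement is the Claim_ definition above) =====
theorem make_class_labels_spec : Claim_equal_make_class_labels := by
  intro object_list _
  unfold Spec_make_class_labels make_class_labels
  rw [pvFold_map]
  have h0 : ((PySem.Dict.empty : PySem.Dict String Int), (0 : Int))
      = (pvMkD [], (([] : List String).length : Int)) := by rfl
  rw [h0, pvLoopA (object_list.map pvPrefix) [] (by simp)]
  have hset : PySem.Set.update [] (object_list.map pvPrefix)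
      = PySem.List.dedup (object_list.map pvPrefix) := by
    rw [PySem.List.dedup_eq_ofList]; rfl
  rw [hset]
  set ps := object_list.map pvPrefix with hps
  have hE : (PySem.List.enumerate ps 0).map Prod.snd = ps := PySem.List.map_snd_enumerate ps 0
  have hsorted : PySem.List.sorted (pvD (PySem.List.enumerate ps 0)).items
      (fun kv => kv.2) false = pvT (PySem.List.enumerate ps 0) :=
    pvSorted_eq _ (PySem.List.pairwise_lt_enumerate ps 0)
  have hfst : (pvT (PySem.List.enumerate ps 0)).map Prod.fst = PySem.List.dedup ps := by
    rw [pvT_map_fst, hE]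
  have hB : make_class_labels_alt object_list
      = ((PySem.List.enumerate (PySem.List.sorted
            (pvD (PySem.List.enumerate ps 0)).items (fun kv => kv.2) false) 0).foldl
          (fun (d : PySem.Dict String Int) rp => d.insert rp.2.1 rp.1)
          PySem.Dict.empty).items := rfl
  rw [hB, hsorted, pvAltItems _ (by rw [hfst]; exact PySem.List.nodup_dedup _),
      pvEnum_map, hfst]
  rfl
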